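-- pv_equiv track=rewrite | github.com/julienR2/BluesMyMind | source/pattern_utils.py | get_pattern_velocity
-- ===== SOURCE A (Python) =====
-- def get_pattern_velocity(pattern):
--     number_notes = 0
--     note_temp = 0
--     if len(pattern) < 2:
--         return 1
--     else :
--         for note in pattern :
--
--             if note_temp == 0:
--                 number_notes+=1
--             else:
--                 if note[2]!=note_temp[2]:
--                     number_notes+=1
--             note_temp = note
--
--         if number_notes < 4:
--             return 1 # lent
--
--         elif number_notes < 7 :
--             return 2 # moyen
--
--         else :
--             return 3 # rapide
-- ===== SOURCE B (Python) =====
-- def _runs(keys):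
--     # count maximal runs of equal values by skipping each whole run, recursively
--     if not keys:
--         return 0
--     head = keys[0]
--     i = 1
--     while i < len(keys) and keys[i] == head:
--         i += 1
--     return 1 + _runs(keys[i:])
--
-- def get_pattern_velocity(pattern):
--     if len(pattern) < 2:
--         return 1
--     number_notes = _runs([note[2] for note in pattern])
--     return 1 + (number_notes >= 4) + (number_notes >= 7)
-- ===== Notes on version B (the rewrite author's own statement) =====
-- stated objective: alternative
-- what changed: A's single stateful loop with a previous-note sentinel and an if/elif bucket chain is replaced by a run-skipping recursion over the extracted third elements (each call consumes one whole maximal run and counts it) followed by an arithmetic classification 1 + (n>=4) + (n>=7).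
import Mathlib
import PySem

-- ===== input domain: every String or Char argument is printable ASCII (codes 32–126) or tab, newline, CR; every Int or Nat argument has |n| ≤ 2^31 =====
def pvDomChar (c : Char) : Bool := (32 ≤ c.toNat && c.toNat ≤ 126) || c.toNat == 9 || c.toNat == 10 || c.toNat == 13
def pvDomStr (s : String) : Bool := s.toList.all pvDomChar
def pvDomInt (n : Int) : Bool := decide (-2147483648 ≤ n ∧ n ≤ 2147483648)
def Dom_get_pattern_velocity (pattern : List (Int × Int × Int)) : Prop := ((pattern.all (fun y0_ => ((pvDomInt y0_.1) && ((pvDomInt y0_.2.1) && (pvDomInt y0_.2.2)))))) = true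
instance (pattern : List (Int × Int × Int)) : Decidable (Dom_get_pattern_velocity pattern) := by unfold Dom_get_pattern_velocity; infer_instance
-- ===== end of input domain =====

-- B replaces A's stateful loop (previous-note sentinel + if/elif buckets) by a run-skipping
-- recursion over the third elements plus an arithmetic classification; no speed claim.

-- ===== PORT A =====
-- A's loop: state (number_notes, note_temp); note_temp = 0 initially (Python int sentinel),
-- then the previous note; modelled as Option (none = the sentinel 0).
def get_pattern_velocity (pattern : List (Int × Int × Int)) : Int :=
  if pattern.length < 2 then 1
  else
    let st := pattern.foldl
      (fun (st : Int × Option (Int × Int × Int)) note =>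
        let n := match st.2 with
          | none => st.1 + 1
          | some t => if note.2.2 ≠ t.2.2 then st.1 + 1 else st.1
        (n, some note))
      (0, none)
    if st.1 < 4 then 1
    else if st.1 < 7 then 2
    else 3

-- ===== PORT B =====
-- Source B's _runs: counts maximal runs by skipping one whole run per recursive call
-- (the Python while loop that advances i past the run is the dropWhile here).
def pvRuns (keys : List Int) : Nat :=
  match keys with
  | [] => 0
  | k :: ks => 1 + pvRuns (ks.dropWhile (fun x => x == k))
termination_by keys.length
decreasing_by
  have := List.length_dropWhile_le (fun x => x == k) ks
  simp only [List.length_cons]; omega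

def get_pattern_velocity_alt (pattern : List (Int × Int × Int)) : Int :=
  if pattern.length < 2 then 1
  else
    let number_notes : Nat := pvRuns (pattern.map (fun note => note.2.2))
    1 + (if 4 ≤ number_notes then 1 else 0) + (if 7 ≤ number_notes then 1 else 0)

-- ===== PRECONDITION & SPEC =====
def Spec_get_pattern_velocity (pattern : List (Int × Int × Int)) (out : Int) : Prop := out = get_pattern_velocity_alt pattern
instance (pattern : List (Int × Int × Int)) (out : Int) : Decidable (Spec_get_pattern_velocity pattern out) := by unfold Spec_get_pattern_velocity; infer_instance

-- ===== CLAIM (what is proved, stated in full; the proofs are below) =====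
def Claim_equal_get_pattern_velocity : Prop := ∀ (pattern : List (Int × Int × Int)), Dom_get_pattern_velocity pattern → Spec_get_pattern_velocity pattern (get_pattern_velocity pattern)

-- ===== LEMMAS AND PROOFS =====

-- Step equation for runs: the head of the rest either extends the current run or starts a new one.
theorem pvRuns_cons_cons (a b : Int) (t : List Int) :
    pvRuns (a :: b :: t) = pvRuns (b :: t) + (if b = a then 0 else 1) := by
  by_cases h : b = a
  · subst h
    conv_lhs => rw [pvRuns.eq_def]
    conv_rhs => rw [pvRuns.eq_def]
    simp [List.dropWhile]
  · conv_lhs => rw [pvRuns.eq_def]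
    simp only [List.dropWhile_cons, beq_iff_eq, h, if_false]
    omega

-- runs of a nonempty list = 1 + number of adjacent changes.
theorem pvRuns_eq_changes (a : Int) (l : List Int) :
    pvRuns (a :: l) = 1 + ((a :: l).zip l).countP (fun p => p.1 ≠ p.2) := by
  induction l generalizing a with
  | nil => simp [pvRuns.eq_def]
  | cons b t ih =>
    rw [pvRuns_cons_cons, ih b]
    simp only [List.zip_cons_cons, List.countP_cons]
    by_cases h : b = a
    · simp [h]
    · simp [h, mt Eq.symm h]
      omega

-- A's fold from state (n, some t) over l adds the number of adjacent third-component changes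
-- along the chain t :: l.
theorem pv_foldl_some (l : List (Int × Int × Int)) (n : Int) (t : Int × Int × Int) :
    (l.foldl
      (fun (st : Int × Option (Int × Int × Int)) note =>
        let m := match st.2 with
          | none => st.1 + 1
          | some t => if note.2.2 ≠ t.2.2 then st.1 + 1 else st.1
        (m, some note))
      (n, some t)).1
    = n + (((t :: l).zip l).countP (fun p => p.1.2.2 ≠ p.2.2.2) : Nat) := by
  induction l generalizing n t with
  | nil => simp
  | cons x xs ih =>
    simp only [List.foldl_cons, List.zip_cons_cons, List.countP_cons]
    rw [ih]
    by_cases h : t.2.2 = x.2.2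
    · simp [h]
    · simp [h, mt Eq.symm h]
      omega

-- adjacency count of third components = adjacency count of the mapped key list
theorem pv_zip_map (a : Int × Int × Int) (l : List (Int × Int × Int)) :
    ((a.2.2 :: l.map (fun note => note.2.2)).zip (l.map (fun note => note.2.2))).countP
        (fun p => p.1 ≠ p.2)
    = ((a :: l).zip l).countP (fun p => p.1.2.2 ≠ p.2.2.2) := by
  induction l generalizing a with
  | nil => simp
  | cons b t ih => simp only [List.map_cons, List.zip_cons_cons, List.countP_cons]; rw [ih b]

-- ===== VERDICT (by name: the statement is the Claim_ definition above) =====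
theorem get_pattern_velocity_spec : Claim_equal_get_pattern_velocity := by
  intro pattern _
  unfold Spec_get_pattern_velocity get_pattern_velocity get_pattern_velocity_alt
  match pattern with
  | [] => simp
  | [a] => simp
  | a :: b :: rest =>
    simp only [List.length_cons]
    rw [if_neg (show ¬(rest.length + 1 + 1 < 2) by omega),
        if_neg (show ¬(rest.length + 1 + 1 < 2) by omega)]
    simp only [List.foldl_cons, zero_add]
    have hA := pv_foldl_some (b :: rest) 1 a
    simp only [List.foldl_cons] at hA
    rw [hA]
    have hB : pvRuns ((a :: b :: rest).map (fun note => note.2.2))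
        = 1 + ((a :: b :: rest).zip (b :: rest)).countP (fun p => p.1.2.2 ≠ p.2.2.2) := by
      rw [show (a :: b :: rest).map (fun note : Int × Int × Int => note.2.2)
            = a.2.2 :: ((b :: rest).map (fun note => note.2.2)) from rfl,
          pvRuns_eq_changes, pv_zip_map]
    rw [hB]
    set c := ((a :: b :: rest).zip (b :: rest)).countP (fun p => p.1.2.2 ≠ p.2.2.2) with hc
    split_ifs <;> omega
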